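-- pv_equiv track=rewrite | github.com/lqor/pdprep | scripts/enhance-remaining-questions.py | enhance_trigger_examples
-- ===== SOURCE A (Python) =====
-- from typing import Dict, List
--
-- def enhance_trigger_examples(questions: List[Dict]):
--     """Add code snippets to trigger-related questions."""
--     changes = 0
--
--     # Find before-insert trigger questions
--     for idx, q in enumerate(questions):
--         if 'before-insert' in q.get('explanation', '').lower() and not q.get('codeSnippet'):
--             q['codeSnippet'] = """// Before-insert trigger example
-- trigger OpportunityTrigger on Opportunity (before insert) {
--     for (Opportunity opp : Trigger.new) {
--         // Set default values before insert
--         if (opp.Probability == null) {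
--             if (opp.StageName == 'Prospecting') {
--                 opp.Probability = 10;
--             } else if (opp.StageName == 'Qualification') {
--                 opp.Probability = 25;
--             }
--         }
--     }
-- }"""
--             changes += 1
--             break  # Only add to one example
--
--     # Find after-insert trigger questions without code
--     for idx, q in enumerate(questions):
--         if 'after-insert' in q.get('explanation', '').lower() and not q.get('codeSnippet'):
--             q['codeSnippet'] = """// After-insert trigger example
-- trigger CaseTrigger on Case (after insert) {
--     List<Task> tasks = new List<Task>();
--
--     for (Case c : Trigger.new) {
--         // Create follow-up task after case creation
--         if (c.Priority == 'High') {
--             tasks.add(new Task(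
--                 Subject = 'Follow up on high priority case',
--                 WhatId = c.Id,
--                 ActivityDate = Date.today().addDays(1)
--             ));
--         }
--     }
--
--     if (!tasks.isEmpty()) {
--         insert tasks;
--     }
-- }"""
--             changes += 1
--             break
--
--     # Find Trigger.new vs Trigger.old questions
--     for idx, q in enumerate(questions):
--         if 'trigger.new' in q.get('explanation', '').lower() and 'trigger.old' in q.get('explanation', '').lower() and not q.get('codeSnippet'):
--             q['codeSnippet'] = """// Trigger.new vs Trigger.old in before update
-- trigger AccountTrigger on Account (before update) {
--     for (Account acc : Trigger.new) {
--         Account oldAcc = Trigger.oldMap.get(acc.Id);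
--
--         // Check if Industry changed
--         if (acc.Industry != oldAcc.Industry) {
--             acc.Description = 'Industry changed from ' +
--                 oldAcc.Industry + ' to ' + acc.Industry +
--                 ' on ' + System.today();
--         }
--     }
-- }"""
--             changes += 1
--             break
--
--     return changes
-- ===== SOURCE B (Python) =====
-- from typing import Dict, List
--
-- _BEFORE_SNIPPET = """// Before-insert trigger example
-- trigger OpportunityTrigger on Opportunity (before insert) {
--     for (Opportunity opp : Trigger.new) {
--         // Set default values before insert
--         if (opp.Probability == null) {
--             if (opp.StageName == 'Prospecting') {
--                 opp.Probability = 10;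
--             } else if (opp.StageName == 'Qualification') {
--                 opp.Probability = 25;
--             }
--         }
--     }
-- }"""
--
-- _AFTER_SNIPPET = """// After-insert trigger example
-- trigger CaseTrigger on Case (after insert) {
--     List<Task> tasks = new List<Task>();
--
--     for (Case c : Trigger.new) {
--         // Create follow-up task after case creation
--         if (c.Priority == 'High') {
--             tasks.add(new Task(
--                 Subject = 'Follow up on high priority case',
--                 WhatId = c.Id,
--                 ActivityDate = Date.today().addDays(1)
--             ));
--         }
--     }
--
--     if (!tasks.isEmpty()) {
--         insert tasks;
--     }
-- }"""
--
-- _NEW_OLD_SNIPPET = """// Trigger.new vs Trigger.old in before update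
-- trigger AccountTrigger on Account (before update) {
--     for (Account acc : Trigger.new) {
--         Account oldAcc = Trigger.oldMap.get(acc.Id);
--
--         // Check if Industry changed
--         if (acc.Industry != oldAcc.Industry) {
--             acc.Description = 'Industry changed from ' +
--                 oldAcc.Industry + ' to ' + acc.Industry +
--                 ' on ' + System.today();
--         }
--     }
-- }"""
--
--
-- def _wants_before(q):
--     return 'before-insert' in q.get('explanation', '').lower()
--
--
-- def _wants_after(q):
--     return 'after-insert' in q.get('explanation', '').lower()
--
--
-- def _wants_new_old(q):
--     e = q.get('explanation', '').lower()
--     return 'trigger.new' in e and 'trigger.old' in e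
--
--
-- def enhance_trigger_examples(questions: List[Dict]):
--     """Add code snippets to trigger-related questions.
--
--     Single left-to-right pass over the questions: each snippetless question
--     claims the highest-priority still-available snippet whose predicate it
--     matches.  Correct because a snippet set during the pass is never re-read:
--     matching by question order yields the same greedy assignment as matching
--     by snippet order.
--     """
--     avail = [
--         (_wants_before, _BEFORE_SNIPPET),
--         (_wants_after, _AFTER_SNIPPET),
--         (_wants_new_old, _NEW_OLD_SNIPPET),
--     ]
--     changes = 0
--     for q in questions:
--         if q.get('codeSnippet') or not avail:
--             continue
--         for i, (pred, snippet) in enumerate(avail):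
--             if pred(q):
--                 q['codeSnippet'] = snippet
--                 del avail[i]
--                 changes += 1
--                 break
--     return changes
-- ===== Notes on version B (the rewrite author's own statement) =====
-- stated objective: alternative
-- what changed: Replaces A's three snippet-major scans of the question list (one scan per hard-coded snippet block, each re-reading the mutated list) by a single question-major left-to-right pass in which each snippetless question claims the first still-available matching snippet from an ordered availability list; the two greedy traversal orders provably yield the same assignment and count.
import Mathlib
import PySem

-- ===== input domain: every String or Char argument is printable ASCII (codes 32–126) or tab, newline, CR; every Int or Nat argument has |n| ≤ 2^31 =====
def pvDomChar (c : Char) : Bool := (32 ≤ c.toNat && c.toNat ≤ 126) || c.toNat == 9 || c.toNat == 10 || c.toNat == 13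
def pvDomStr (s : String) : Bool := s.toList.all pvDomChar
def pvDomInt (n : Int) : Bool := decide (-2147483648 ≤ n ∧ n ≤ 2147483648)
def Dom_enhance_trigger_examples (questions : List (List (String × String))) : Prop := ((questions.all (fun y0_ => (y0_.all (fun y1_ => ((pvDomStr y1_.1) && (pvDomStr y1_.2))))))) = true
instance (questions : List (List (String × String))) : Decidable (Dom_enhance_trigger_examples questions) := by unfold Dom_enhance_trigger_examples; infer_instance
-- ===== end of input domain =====

-- B replaces A's three snippet-major scans of the question list by ONE question-major pass in
-- which each snippetless question claims the first still-available matching snippet (objective: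
-- alternative traversal order). Both Pythons mutate the question dicts in place identically;
-- the theorems below are about the return value.

-- The three snippet texts, shared verbatim by both Python sources.
def pvSnippetBefore : String := "// Before-insert trigger example\ntrigger OpportunityTrigger on Opportunity (before insert) {\n    for (Opportunity opp : Trigger.new) {\n        // Set default values before insert\n        if (opp.Probability == null) {\n            if (opp.StageName == 'Prospecting') {\n                opp.Probability = 10;\n            } else if (opp.StageName == 'Qualification') {\n                opp.Probability = 25;\n            }\n        }\n    }\n}"
def pvSnippetAfter : String := "// After-insert trigger example\ntrigger CaseTrigger on Case (after insert) {\n    List<Task> tasks = new List<Task>();\n\n    for (Case c : Trigger.new) {\n        // Create follow-up task after case creation\n        if (c.Priority == 'High') {\n            tasks.add(new Task(\n                Subject = 'Follow up on high priority case',\n                WhatId = c.Id,\n                ActivityDate = Date.today().addDays(1)\n            ));\n        }\n    }\n\n    if (!tasks.isEmpty()) {\n        insert tasks;\n    }\n}"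
def pvSnippetNewOld : String := "// Trigger.new vs Trigger.old in before update\ntrigger AccountTrigger on Account (before update) {\n    for (Account acc : Trigger.new) {\n        Account oldAcc = Trigger.oldMap.get(acc.Id);\n\n        // Check if Industry changed\n        if (acc.Industry != oldAcc.Industry) {\n            acc.Description = 'Industry changed from ' +\n                oldAcc.Industry + ' to ' + acc.Industry +\n                ' on ' + System.today();\n        }\n    }\n}"

-- ===== PORT A =====
-- A's first for-loop with break: returns (updated questions, whether a change was made)
def pvA_loop1 : List (List (String × String)) → (List (List (String × String)) × Bool)
  | [] => ([], false)
  | q :: rest =>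
    if PySem.Str.isIn "before-insert" (PySem.Str.lower ((PySem.Dict.mk q).getD "explanation" ""))
        && ((PySem.Dict.mk q).getD "codeSnippet" "" == "") then
      (((PySem.Dict.mk q).insert "codeSnippet" pvSnippetBefore).items :: rest, true)
    else
      let r := pvA_loop1 rest
      (q :: r.1, r.2)

-- A's second for-loop with break
def pvA_loop2 : List (List (String × String)) → (List (List (String × String)) × Bool)
  | [] => ([], false)
  | q :: rest =>
    if PySem.Str.isIn "after-insert" (PySem.Str.lower ((PySem.Dict.mk q).getD "explanation" ""))
        && ((PySem.Dict.mk q).getD "codeSnippet" "" == "") then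
      (((PySem.Dict.mk q).insert "codeSnippet" pvSnippetAfter).items :: rest, true)
    else
      let r := pvA_loop2 rest
      (q :: r.1, r.2)

-- A's third for-loop with break
def pvA_loop3 : List (List (String × String)) → (List (List (String × String)) × Bool)
  | [] => ([], false)
  | q :: rest =>
    if PySem.Str.isIn "trigger.new" (PySem.Str.lower ((PySem.Dict.mk q).getD "explanation" ""))
        && PySem.Str.isIn "trigger.old" (PySem.Str.lower ((PySem.Dict.mk q).getD "explanation" ""))
        && ((PySem.Dict.mk q).getD "codeSnippet" "" == "") then
      (((PySem.Dict.mk q).insert "codeSnippet" pvSnippetNewOld).items :: rest, true)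
    else
      let r := pvA_loop3 rest
      (q :: r.1, r.2)

def enhance_trigger_examples (questions : List (List (String × String))) : Int :=
  let changes : Int := 0
  let r1 := pvA_loop1 questions
  let changes := changes + (if r1.2 then 1 else 0)
  let r2 := pvA_loop2 r1.1
  let changes := changes + (if r2.2 then 1 else 0)
  let r3 := pvA_loop3 r2.1
  let changes := changes + (if r3.2 then 1 else 0)
  changes

-- ===== PORT B =====
def pvB_wants_before (q : List (String × String)) : Bool :=
  PySem.Str.isIn "before-insert" (PySem.Str.lower ((PySem.Dict.mk q).getD "explanation" ""))

def pvB_wants_after (q : List (String × String)) : Bool :=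
  PySem.Str.isIn "after-insert" (PySem.Str.lower ((PySem.Dict.mk q).getD "explanation" ""))

def pvB_wants_new_old (q : List (String × String)) : Bool :=
  let e := PySem.Str.lower ((PySem.Dict.mk q).getD "explanation" "")
  PySem.Str.isIn "trigger.new" e && PySem.Str.isIn "trigger.old" e

-- Source B's inner loop: first available spec matching q; returns its snippet and the remaining specs
def pvB_take (q : List (String × String)) :
    List ((List (String × String) → Bool) × String) → Option (String × List ((List (String × String) → Bool) × String))
  | [] => none
  | s :: rest =>
    if s.1 q then some (s.2, rest)
    else
      match pvB_take q rest with
      | none => none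
      | some (sn, r) => some (sn, s :: r)

-- Source B's single pass over the questions, carrying the still-available specs
def pvB_go (avail : List ((List (String × String) → Bool) × String)) :
    List (List (String × String)) → Int
  | [] => 0
  | q :: rest =>
    if !((PySem.Dict.mk q).getD "codeSnippet" "" == "") || avail.isEmpty then
      pvB_go avail rest
    else
      match pvB_take q avail with
      | some (_, avail') => 1 + pvB_go avail' rest
      | none => pvB_go avail rest

def enhance_trigger_examples_alt (questions : List (List (String × String))) : Int :=
  pvB_go [(pvB_wants_before, pvSnippetBefore), (pvB_wants_after, pvSnippetAfter),
          (pvB_wants_new_old, pvSnippetNewOld)] questions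

-- ===== PRECONDITION & SPEC =====
def Spec_enhance_trigger_examples (questions : List (List (String × String))) (out : Int) : Prop := out = enhance_trigger_examples_alt questions
instance (questions : List (List (String × String))) (out : Int) : Decidable (Spec_enhance_trigger_examples questions out) := by unfold Spec_enhance_trigger_examples; infer_instance

-- ===== CLAIM (what is proved, stated in full; the proofs are below) =====
def Claim_equal_enhance_trigger_examples : Prop := ∀ (questions : List (List (String × String))), Dom_enhance_trigger_examples questions → Spec_enhance_trigger_examples questions (enhance_trigger_examples questions)

-- ===== LEMMAS AND PROOFS =====

-- generic A-side scan (each of A's three loops is an instance)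
def pvScan (p : List (String × String) → Bool) (sn : String) :
    List (List (String × String)) → (List (List (String × String)) × Bool)
  | [] => ([], false)
  | q :: rest =>
    if p q && ((PySem.Dict.mk q).getD "codeSnippet" "" == "") then
      (((PySem.Dict.mk q).insert "codeSnippet" sn).items :: rest, true)
    else
      let r := pvScan p sn rest
      (q :: r.1, r.2)

-- A's whole body, generically over a list of specs
def pvRunA : List ((List (String × String) → Bool) × String) → List (List (String × String)) → (List (List (String × String)) × Int)
  | [], qs => (qs, 0)
  | s :: S, qs =>
    let r := pvScan s.1 s.2 qs
    let t := pvRunA S r.1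
    (t.1, (if r.2 then 1 else 0) + t.2)

theorem pvScan_eq_loop1 (qs : List (List (String × String))) :
    pvScan pvB_wants_before pvSnippetBefore qs = pvA_loop1 qs := by
  induction qs with
  | nil => rfl
  | cons q rest ih => simp [pvScan, pvA_loop1, pvB_wants_before, ih]

theorem pvScan_eq_loop2 (qs : List (List (String × String))) :
    pvScan pvB_wants_after pvSnippetAfter qs = pvA_loop2 qs := by
  induction qs with
  | nil => rfl
  | cons q rest ih => simp [pvScan, pvA_loop2, pvB_wants_after, ih]

theorem pvScan_eq_loop3 (qs : List (List (String × String))) :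
    pvScan pvB_wants_new_old pvSnippetNewOld qs = pvA_loop3 qs := by
  induction qs with
  | nil => rfl
  | cons q rest ih => simp [pvScan, pvA_loop3, pvB_wants_new_old, Bool.and_assoc, ih]

-- if q already has a snippet, or no spec in S matches q, every scan leaves q in place
theorem pvRunA_skip (S : List ((List (String × String) → Bool) × String))
    (q : List (String × String)) (rest : List (List (String × String)))
    (h : ¬((PySem.Dict.mk q).getD "codeSnippet" "" == "") = true ∨ ∀ s ∈ S, s.1 q = false) :
    pvRunA S (q :: rest) = (q :: (pvRunA S rest).1, (pvRunA S rest).2) := by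
  induction S generalizing rest with
  | nil => rfl
  | cons s T ih =>
    have hc : (s.1 q && ((PySem.Dict.mk q).getD "codeSnippet" "" == "")) = false := by
      rcases h with h | h
      · have hb : ((PySem.Dict.mk q).getD "codeSnippet" "" == "") = false := by
          simpa using h
        simp [hb]
      · simp [h s (by simp)]
    have h' : ¬((PySem.Dict.mk q).getD "codeSnippet" "" == "") = true ∨ ∀ s' ∈ T, s'.1 q = false := by
      rcases h with h | h
      · exact Or.inl h
      · exact Or.inr fun s' hs' => h s' (by simp [hs'])
    simp [pvRunA, pvScan, hc, ih _ h']

theorem pvB_take_none_iff (q : List (String × String))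
    (S : List ((List (String × String) → Bool) × String)) :
    pvB_take q S = none ↔ ∀ s ∈ S, s.1 q = false := by
  induction S with
  | nil => simp [pvB_take]
  | cons s T ih =>
    by_cases hs : s.1 q
    · simp [pvB_take, hs]
    · have hs' : s.1 q = false := by simpa using hs
      cases hT : pvB_take q T with
      | none =>
        rw [pvB_take, if_neg (by simp [hs']), hT]
        simp [hs']
        exact fun a b hab => ih.1 hT (a, b) hab
      | some r =>
        obtain ⟨sn, r'⟩ := r
        rw [pvB_take, if_neg (by simp [hs']), hT]
        simp [hs']
        have hne : ¬(∀ s ∈ T, s.1 q = false) := fun hall => by simp [ih.2 hall] at hT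
        push Not at hne
        obtain ⟨⟨a, b⟩, hmem, hneq⟩ := hne
        exact ⟨a, ⟨b, hmem⟩, by simpa using hneq⟩

-- elements of the leftover spec list came from the original
theorem pvB_take_mem (q : List (String × String))
    (S S' : List ((List (String × String) → Bool) × String)) (sn : String)
    (h : pvB_take q S = some (sn, S')) : ∀ s ∈ S', s ∈ S := by
  induction S generalizing S' with
  | nil => simp [pvB_take] at h
  | cons s T ih =>
    by_cases hs : s.1 q
    · rw [pvB_take, if_pos hs, Option.some.injEq, Prod.mk.injEq] at h
      obtain ⟨-, h2⟩ := h
      subst h2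
      exact fun x hx => List.mem_cons_of_mem _ hx
    · cases hT : pvB_take q T with
      | none => rw [pvB_take, if_neg (by simp [hs]), hT] at h; exact absurd h (by simp)
      | some r =>
        obtain ⟨sn', T'⟩ := r
        rw [pvB_take, if_neg (by simp [hs]), hT, Option.some.injEq, Prod.mk.injEq] at h
        obtain ⟨h1, h2⟩ := h
        subst h1; subst h2
        intro x hx
        rcases List.mem_cons.1 hx with hx | hx
        · simp [hx]
        · exact List.mem_cons_of_mem _ (ih T' hT x hx)

-- the step case where q takes a snippet
theorem pvRunA_step (S S' : List ((List (String × String) → Bool) × String)) (sn : String)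
    (hnz : ∀ s ∈ S, s.2 ≠ "")
    (q : List (String × String)) (rest : List (List (String × String)))
    (hq : ((PySem.Dict.mk q).getD "codeSnippet" "" == "") = true)
    (ht : pvB_take q S = some (sn, S')) :
    pvRunA S (q :: rest) =
      (((PySem.Dict.mk q).insert "codeSnippet" sn).items :: (pvRunA S' rest).1,
       1 + (pvRunA S' rest).2) := by
  induction S generalizing S' rest with
  | nil => simp [pvB_take] at ht
  | cons s T ih =>
    by_cases hs : s.1 q
    · rw [pvB_take, if_pos hs, Option.some.injEq, Prod.mk.injEq] at ht
      obtain ⟨h1, h2⟩ := ht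
      subst h1; subst h2
      have hq' : ¬(((PySem.Dict.mk (((PySem.Dict.mk q).insert "codeSnippet" s.2).items)).getD "codeSnippet" "" == "") = true) := by
        have he : (PySem.Dict.mk (((PySem.Dict.mk q).insert "codeSnippet" s.2).items)) = (PySem.Dict.mk q).insert "codeSnippet" s.2 := rfl
        rw [he]
        simp [PySem.Dict.getD_insert_self]
        exact hnz s (by simp)
      rw [pvRunA, pvScan]
      simp only [hs, hq, Bool.and_self, if_pos]
      rw [pvRunA_skip T _ rest (Or.inl hq')]
    · cases hT : pvB_take q T with
      | none => rw [pvB_take, if_neg (by simp [hs]), hT] at ht; exact absurd ht (by simp)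
      | some r =>
        obtain ⟨sn', T'⟩ := r
        rw [pvB_take, if_neg (by simp [hs]), hT, Option.some.injEq, Prod.mk.injEq] at ht
        obtain ⟨h1, h2⟩ := ht
        subst h1; subst h2
        have hnzT : ∀ x ∈ T, x.2 ≠ "" := fun x hx => hnz x (by simp [hx])
        have hc : (s.1 q && ((PySem.Dict.mk q).getD "codeSnippet" "" == "")) = false := by simp [hs]
        rw [pvRunA, pvScan]
        simp only [hc, if_neg Bool.false_ne_true]
        rw [ih T' hnzT ((pvScan s.1 s.2 rest).1) hT]
        rw [pvRunA]
        simp [add_comm, add_left_comm]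

-- main: A's snippet-major run equals B's question-major pass
theorem pvRunA_eq_go (qs : List (List (String × String)))
    (S : List ((List (String × String) → Bool) × String)) (hnz : ∀ s ∈ S, s.2 ≠ "") :
    (pvRunA S qs).2 = pvB_go S qs := by
  induction qs generalizing S with
  | nil =>
    induction S with
    | nil => rfl
    | cons s T ihS => simp [pvRunA, pvScan, pvB_go, ihS (fun x hx => hnz x (by simp [hx]))]
  | cons q rest ih =>
    by_cases hq : ((PySem.Dict.mk q).getD "codeSnippet" "" == "") = true
    · cases ht : pvB_take q S with
      | none =>
        have key : pvB_go S (q :: rest) = pvB_go S rest := by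
          cases S with
          | nil => simp [pvB_go]
          | cons s T => simp [pvB_go, hq, ht]
        rw [pvRunA_skip S q rest (Or.inr ((pvB_take_none_iff q S).1 ht)), key]
        exact ih S hnz
      | some r =>
        obtain ⟨sn, S'⟩ := r
        have hnz' : ∀ x ∈ S', x.2 ≠ "" := fun x hx => hnz x (pvB_take_mem q S S' sn ht x hx)
        have key : pvB_go S (q :: rest) = 1 + pvB_go S' rest := by
          cases S with
          | nil => simp [pvB_take] at ht
          | cons s T => simp [pvB_go, hq, ht]
        rw [pvRunA_step S S' sn hnz q rest hq ht, key]
        simp [ih S' hnz']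
    · have key : pvB_go S (q :: rest) = pvB_go S rest := by
        cases S with
        | nil => simp [pvB_go]
        | cons s T => simp [pvB_go, hq]
      rw [pvRunA_skip S q rest (Or.inl hq), key]
      exact ih S hnz

-- ===== VERDICT (by name: the statement is the Claim_ definition above) =====
theorem enhance_trigger_examples_spec : Claim_equal_enhance_trigger_examples := by
  intro questions _
  unfold Spec_enhance_trigger_examples enhance_trigger_examples enhance_trigger_examples_alt
  rw [← pvRunA_eq_go questions
        [(pvB_wants_before, pvSnippetBefore), (pvB_wants_after, pvSnippetAfter),
         (pvB_wants_new_old, pvSnippetNewOld)]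
        (by intro s hs; fin_cases hs <;> simp [pvSnippetBefore, pvSnippetAfter, pvSnippetNewOld])]
  simp [pvRunA, pvScan_eq_loop1, pvScan_eq_loop2, pvScan_eq_loop3]
  omega
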